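-- pv_equiv track=rewrite | github.com/DongYun666/leetcode | 1005.K次取反后最大化的数组和.py | largestSumAfterKNegations3
-- ===== SOURCE A (Python) =====
-- from collections import Counter
-- from typing import List
--
-- def largestSumAfterKNegations3(nums: List[int], k: int) -> int:
--     freq = Counter(nums)
--     ans = sum(nums)
--     for i in range(-100, 0):
--         if freq[i]:
--             ops = min(k, freq[i])
--             ans += -i * ops * 2
--             freq[i] -= ops
--             freq[-i] += ops
--             k -= ops
--             if k == 0:
--                 break
--
--     if k > 0 and k % 2 == 1 and not freq[0]:
--         for i in range(1, 101):
--             if freq[i]: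
--                 ans -= i * 2
--                 break
--
--     return ans
-- ===== SOURCE B (Python) =====
-- def largestSumAfterKNegations3(nums, k):
--     negs = sorted(x for x in nums if x < 0)
--     flip = min(k, len(negs))
--     ans = sum(nums) - 2 * sum(negs[:flip])
--     k -= flip
--     if k > 0 and k % 2 == 1 and nums:
--         ans -= 2 * min(abs(x) for x in nums)
--     return ans
-- ===== Notes on version B (the rewrite author's own statement) =====
-- stated objective: simpler
-- what changed: Replaces A's Counter table walked over the fixed value range -100..100 (with in-loop dict updates and a second range scan for the smallest positive) by a closed form: sort the negatives, subtract twice the sum of the k most negative ones, and if an odd budget is left over subtract twice the smallest absolute value.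
-- outside the precondition, e.g. on largestSumAfterKNegations3([-200], 1): A returns -200, B returns 200; on largestSumAfterKNegations3([101], 1): A returns 101, B returns -101; on largestSumAfterKNegations3([-1], -1): A returns -3, B returns -1
import Mathlib
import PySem

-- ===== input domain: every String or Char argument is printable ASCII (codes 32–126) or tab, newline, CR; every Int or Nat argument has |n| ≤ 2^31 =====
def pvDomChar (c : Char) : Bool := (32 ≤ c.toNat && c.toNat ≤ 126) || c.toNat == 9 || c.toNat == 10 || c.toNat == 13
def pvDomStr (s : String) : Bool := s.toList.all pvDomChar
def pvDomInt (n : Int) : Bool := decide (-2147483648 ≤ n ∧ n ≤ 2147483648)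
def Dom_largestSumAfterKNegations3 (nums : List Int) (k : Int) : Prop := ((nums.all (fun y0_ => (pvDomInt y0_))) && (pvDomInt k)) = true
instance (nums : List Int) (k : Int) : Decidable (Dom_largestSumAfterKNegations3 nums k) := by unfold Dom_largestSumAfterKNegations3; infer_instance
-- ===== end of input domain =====

-- ===== PORT A =====
-- B replaces A's counting table over the fixed value range [-100,100] by a
-- filter/sort/prefix-sum closed form (objective: simpler); return value only, A mutates no argument.

-- first for-loop of A (for i in range(-100, 0) with its break), state (freq, ans, k)
def pvALoop1 : List Int → PySem.Dict Int Int × Int × Int → PySem.Dict Int Int × Int × Int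
  | [], st => st
  | i :: rest, (freq, ans, k) =>
    if freq.getD i 0 ≠ 0 then
      let ops := min k (freq.getD i 0)
      let ans' := ans + (-i) * ops * 2
      let f1 := freq.insert i (freq.getD i 0 - ops)
      let f2 := f1.insert (-i) (f1.getD (-i) 0 + ops)
      let k' := k - ops
      if k' = 0 then (f2, ans', k') else pvALoop1 rest (f2, ans', k')
    else pvALoop1 rest (freq, ans, k)

-- second for-loop of A (for i in range(1, 101) with its break)
def pvALoop2 : List Int → PySem.Dict Int Int → Int → Int
  | [], _, ans => ans
  | i :: rest, freq, ans =>
    if freq.getD i 0 ≠ 0 then ans - i * 2 else pvALoop2 rest freq ans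

def largestSumAfterKNegations3 (nums : List Int) (k : Int) : Int :=
  let st := pvALoop1 (PySem.List.pyRange (-100) 0 1) (PySem.Dict.counter nums, nums.sum, k)
  if st.2.2 > 0 ∧ PySem.Int.mod st.2.2 2 = 1 ∧ st.1.getD 0 0 = 0 then
    pvALoop2 (PySem.List.pyRange 1 101 1) st.1 st.2.1
  else st.2.1

-- ===== PORT B =====
def largestSumAfterKNegations3_alt (nums : List Int) (k : Int) : Int :=
  let negs := PySem.List.sorted (nums.filter (fun x => decide (x < 0))) (fun x => x) false
  let flip := min k (negs.length : Int)
  let ans := nums.sum - 2 * (PySem.List.slice negs none (some flip)).sum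
  let k1 := k - flip
  if k1 > 0 ∧ PySem.Int.mod k1 2 = 1 then
    ans - 2 * PySem.List.minD (nums.map (fun x => |x|)) (fun x => x) 0
  else ans

-- ===== PRECONDITION & SPEC =====
-- Pre_ keeps the task's natural domain (LeetCode 1005 constraints: nums[i] >= -100, k >= 0) and
-- additionally excludes lists that are nonempty with every element > 100: A's counting loops only
-- cover the fixed value range [-100,100], so on those inputs (and for a negative k) A's returned
-- values are artefacts of its fixed table, which B does not reproduce.
def Pre_largestSumAfterKNegations3 (nums : List Int) (k : Int) : Prop :=
  0 ≤ k ∧ (∀ x ∈ nums, -100 ≤ x) ∧ (nums = [] ∨ ∃ x ∈ nums, x ≤ 100)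
instance (nums : List Int) (k : Int) : Decidable (Pre_largestSumAfterKNegations3 nums k) := by
  unfold Pre_largestSumAfterKNegations3; infer_instance

def pvWitness_largestSumAfterKNegations3 : List Int × Int := ([-3, 2, 0, -1], 2)

def Spec_largestSumAfterKNegations3 (nums : List Int) (k : Int) (out : Int) : Prop := out = largestSumAfterKNegations3_alt nums k
instance (nums : List Int) (k : Int) (out : Int) : Decidable (Spec_largestSumAfterKNegations3 nums k out) := by unfold Spec_largestSumAfterKNegations3; infer_instance

-- ===== CLAIM (what is proved, stated in full; the proofs are below) =====
def Claim_equal_largestSumAfterKNegations3 : Prop := ∀ (nums : List Int) (k : Int), Dom_largestSumAfterKNegations3 nums k → Pre_largestSumAfterKNegations3 nums k → Spec_largestSumAfterKNegations3 nums k (largestSumAfterKNegations3 nums k)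

-- ===== LEMMAS AND PROOFS =====

-- pure model of A's first loop: (sum of i*ops over the processed values, final k, final counts)
def pvModel : List Int → (Int → Int) → Int → Int × Int × (Int → Int)
  | [], g, k => (0, k, g)
  | i :: rest, g, k =>
    let ops := min k (g i)
    let r := pvModel rest (fun u => if u = i then g u - ops else if u = -i then g u + ops else g u) (k - ops)
    (i * ops + r.1, r.2.1, r.2.2)

def pvBlocks : List Int → (Int → Int) → List Int
  | [], _ => []
  | i :: rest, g => List.replicate (g i).toNat i ++ pvBlocks rest g

lemma pvBlocks_congr (L : List Int) (g h : Int → Int) (hgh : ∀ i ∈ L, g i = h i) :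
    pvBlocks L g = pvBlocks L h := by
  induction L with
  | nil => rfl
  | cons i rest ih =>
    simp only [pvBlocks, hgh i (by simp)]
    rw [ih (fun j hj => hgh j (by simp [hj]))]

lemma mem_pvBlocks (L : List Int) (g : Int → Int) (x : Int) (hx : x ∈ pvBlocks L g) : x ∈ L := by
  induction L with
  | nil => simp [pvBlocks] at hx
  | cons i rest ih =>
    simp only [pvBlocks, List.mem_append] at hx
    rcases hx with h | h
    · simp [List.eq_of_mem_replicate h]
    · simp [ih h]

lemma pvBlocks_pairwise (L : List Int) (g : Int → Int) (hp : L.Pairwise (· < ·)) :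
    (pvBlocks L g).Pairwise (· ≤ ·) := by
  induction L with
  | nil => simp [pvBlocks]
  | cons i rest ih =>
    rcases List.pairwise_cons.mp hp with ⟨hi, hrest⟩
    simp only [pvBlocks]
    refine List.pairwise_append.mpr ⟨?_, ih hrest, ?_⟩
    · exact List.pairwise_replicate.mpr (by simp)
    · intro a ha b hb
      rw [List.eq_of_mem_replicate ha]
      exact le_of_lt (hi b (mem_pvBlocks rest g b hb))

lemma count_pvBlocks (L : List Int) (g : Int → Int) (v : Int) (hnd : L.Nodup) :
    (pvBlocks L g).count v = if v ∈ L then (g v).toNat else 0 := by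
  induction L with
  | nil => simp [pvBlocks]
  | cons i rest ih =>
    rcases List.nodup_cons.mp hnd with ⟨hi, hrest⟩
    simp only [pvBlocks, List.count_append, List.count_replicate, ih hrest]
    by_cases hvi : v = i
    · subst hvi; simp [hi]
    · simp [hvi, Ne.symm hvi]

lemma pvRange_neg_pairwise : (PySem.List.pyRange (-100) 0 1).Pairwise (· < ·) := by
  rw [PySem.List.pyRange_one]
  exact List.Pairwise.map _ (fun a b h => by omega) (List.pairwise_lt_range)

lemma pvRange_pos_pairwise : (PySem.List.pyRange 1 101 1).Pairwise (· < ·) := by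
  rw [PySem.List.pyRange_one]
  exact List.Pairwise.map _ (fun a b h => by omega) (List.pairwise_lt_range)

lemma pvALoop2_zero (L : List Int) (freq : PySem.Dict Int Int) (ans : Int)
    (h : ∀ i ∈ L, freq.getD i 0 = 0) : pvALoop2 L freq ans = ans := by
  induction L with
  | nil => rfl
  | cons i rest ih =>
    simp only [pvALoop2, h i (by simp)]
    simp only [ne_eq, not_true_eq_false, if_false]
    exact ih (fun j hj => h j (by simp [hj]))

lemma pvALoop2_first (L : List Int) (freq : PySem.Dict Int Int) (ans j : Int)
    (hj : j ∈ L) (hjnz : freq.getD j 0 ≠ 0)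
    (hmin : ∀ i ∈ L, freq.getD i 0 ≠ 0 → j ≤ i) (hp : L.Pairwise (· < ·)) :
    pvALoop2 L freq ans = ans - j * 2 := by
  induction L with
  | nil => simp at hj
  | cons i rest ih =>
    rcases List.pairwise_cons.mp hp with ⟨hlt, hrest⟩
    by_cases hz : freq.getD i 0 ≠ 0
    · have hji : j ≤ i := hmin i (by simp) hz
      have : j = i := by
        rcases List.mem_cons.mp hj with h | h
        · exact h
        · exact absurd (hlt j h) (by omega)
      simp only [pvALoop2, if_pos hz, this]
    · have hji : j ∈ rest := by
        rcases List.mem_cons.mp hj with h | h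
        · exact absurd hjnz (by rw [h]; simpa using hz)
        · exact h
      simp only [pvALoop2, if_neg hz]
      exact ih hji (fun i hi hnz => hmin i (by simp [hi]) hnz) hrest

lemma pvModel_zero (L : List Int) (g : Int → Int) (hg : ∀ v, 0 ≤ g v) :
    (pvModel L g 0).1 = 0 ∧ (pvModel L g 0).2.1 = 0 ∧ ∀ v, (pvModel L g 0).2.2 v = g v := by
  induction L generalizing g with
  | nil => exact ⟨rfl, rfl, fun v => rfl⟩
  | cons i rest ih =>
    have hops : min (0:Int) (g i) = 0 := by have := hg i; omega
    simp only [pvModel, hops]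
    set g1 : Int → Int := fun u => if u = i then g u - 0 else if u = -i then g u + 0 else g u with hg1
    have hg1v : ∀ v, g1 v = g v := by
      intro v; simp only [hg1]; split_ifs <;> ring
    have hg1nn : ∀ v, 0 ≤ g1 v := fun v => by rw [hg1v]; exact hg v
    obtain ⟨h1, h2, h3⟩ := ih g1 hg1nn
    refine ⟨by simpa using h1, by simpa using h2, fun v => by simpa [hg1v v] using h3 v⟩

lemma pvModel_take (L : List Int) (g : Int → Int) (k : Int)
    (hk : 0 ≤ k) (hg : ∀ v, 0 ≤ g v) (hL : ∀ i ∈ L, i < 0) (hnd : L.Nodup) :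
    (pvModel L g k).1 = ((pvBlocks L g).take k.toNat).sum ∧
    (pvModel L g k).2.1 = k - min k ((pvBlocks L g).length : Int) := by
  induction L generalizing g k with
  | nil => simp [pvModel, pvBlocks]; omega
  | cons i rest ih =>
    rcases List.nodup_cons.mp hnd with ⟨hi, hrest⟩
    have hineg : i < 0 := hL i (by simp)
    set ops := min k (g i) with hops
    set g1 : Int → Int := fun u => if u = i then g u - ops else if u = -i then g u + ops else g u with hg1
    have hg1nn : ∀ v, 0 ≤ g1 v := by
      intro v; simp only [hg1]; split_ifs with h1 h2
      · have := hg i; subst h1; omega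
      · have := hg v; have h0k : 0 ≤ ops := by have := hg i; omega
        omega
      · exact hg v
    have hg1rest : ∀ j ∈ rest, g1 j = g j := by
      intro j hj
      have hjneg : j < 0 := hL j (by simp [hj])
      have hji : j ≠ i := fun h => hi (h ▸ hj)
      simp only [hg1]; rw [if_neg hji, if_neg (by omega)]
    have hbeq : pvBlocks rest g1 = pvBlocks rest g := pvBlocks_congr rest g1 g hg1rest
    have h0ops : 0 ≤ ops := by have := hg i; omega
    have hopsk : ops ≤ k := min_le_left _ _
    obtain ⟨ih1, ih2⟩ := ih g1 (k - ops) (by omega) hg1nn (fun j hj => hL j (by simp [hj])) hrest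
    rw [hbeq] at ih1 ih2
    constructor
    · simp only [pvModel, pvBlocks, ← hops, ← hg1]
      have hkops : (k - ops).toNat = k.toNat - (g i).toNat := by omega
      have hmin : ((min k.toNat (g i).toNat : Nat) : Int) = ops := by
        have := hg i; simp [hops]; omega
      rw [ih1, List.take_append, List.take_replicate, List.sum_append, List.sum_replicate,
        hkops, List.length_replicate, nsmul_eq_mul, hmin]
      ring
    · simp only [pvModel, pvBlocks, ← hops, ← hg1]
      rw [ih2]
      simp only [List.length_append, List.length_replicate]
      have := hg i
      push_cast
      omega

lemma pvModel_g (L : List Int) (g : Int → Int) (k : Int)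
    (hg : ∀ v, 0 ≤ g v) (hL : ∀ i ∈ L, i < 0) (hnd : L.Nodup)
    (hbig : ((pvBlocks L g).length : Int) ≤ k) :
    ∀ v, 0 ≤ v → (pvModel L g k).2.2 v = if -v ∈ L then g v + g (-v) else g v := by
  induction L generalizing g k with
  | nil => intro v hv; simp [pvModel]
  | cons i rest ih =>
    intro v hv
    rcases List.nodup_cons.mp hnd with ⟨hi, hrest⟩
    have hineg : i < 0 := hL i (by simp)
    have hgi : 0 ≤ g i := hg i
    have hblen : ((pvBlocks rest g).length : Int) + (g i).toNat = ((pvBlocks (i :: rest) g).length : Int) := by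
      simp [pvBlocks]; omega
    have hgik : g i ≤ k := by
      have h0 : (0:Int) ≤ (pvBlocks rest g).length := by positivity
      omega
    have hops : min k (g i) = g i := by omega
    set g1 : Int → Int := fun u => if u = i then g u - g i else if u = -i then g u + g i else g u with hg1
    have hg1nn : ∀ u, 0 ≤ g1 u := by
      intro u; simp only [hg1]; split_ifs with h1 h2
      · subst h1; omega
      · have := hg u; omega
      · exact hg u
    have hg1rest : ∀ j ∈ rest, g1 j = g j := by
      intro j hj
      have hjneg : j < 0 := hL j (by simp [hj])
      have hji : j ≠ i := fun h => hi (h ▸ hj)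
      simp only [hg1]; rw [if_neg hji, if_neg (by omega)]
    have hbeq : pvBlocks rest g1 = pvBlocks rest g := pvBlocks_congr rest g1 g hg1rest
    have ihv := ih g1 (k - g i) hg1nn (fun j hj => hL j (by simp [hj])) hrest
      (by rw [hbeq]; omega) v hv
    simp only [pvModel, hops, ← hg1]
    rw [ihv]
    by_cases hvi : -v = i
    · have hvrest : -v ∉ rest := by rw [hvi]; exact hi
      rw [if_neg hvrest, if_pos (by simp [hvi])]
      simp only [hg1]
      rw [if_neg (show v ≠ i by omega), if_pos (show v = -i by omega), hvi]
    · by_cases hvrest : -v ∈ rest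
      · have hvneg : -v < 0 := hL (-v) (by simp [hvrest])
        rw [if_pos hvrest, if_pos (by simp [hvrest])]
        simp only [hg1]
        rw [if_neg (show v ≠ i by omega), if_neg (show v ≠ -i by omega),
          if_neg (show -v ≠ i from hvi), if_neg (show -v ≠ -i by omega)]
      · rw [if_neg hvrest, if_neg (by simp [hvi, hvrest])]
        simp only [hg1]
        rw [if_neg (show v ≠ i by omega), if_neg (show v ≠ -i by omega)]

lemma pvALoop1_cons (i : Int) (rest : List Int) (d : PySem.Dict Int Int) (ans k : Int) :
    pvALoop1 (i :: rest) (d, ans, k) =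
      if d.getD i 0 ≠ 0 then
        if k - min k (d.getD i 0) = 0 then
          ((d.insert i (d.getD i 0 - min k (d.getD i 0))).insert (-i)
            ((d.insert i (d.getD i 0 - min k (d.getD i 0))).getD (-i) 0 + min k (d.getD i 0)),
           ans + (-i) * min k (d.getD i 0) * 2, k - min k (d.getD i 0))
        else
          pvALoop1 rest
            ((d.insert i (d.getD i 0 - min k (d.getD i 0))).insert (-i)
              ((d.insert i (d.getD i 0 - min k (d.getD i 0))).getD (-i) 0 + min k (d.getD i 0)),
             ans + (-i) * min k (d.getD i 0) * 2, k - min k (d.getD i 0))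
      else pvALoop1 rest (d, ans, k) := rfl

lemma pvModel_cons (i : Int) (rest : List Int) (g : Int → Int) (k : Int) :
    pvModel (i :: rest) g k =
      (i * min k (g i) +
        (pvModel rest (fun u => if u = i then g u - min k (g i) else if u = -i then g u + min k (g i) else g u) (k - min k (g i))).1,
       (pvModel rest (fun u => if u = i then g u - min k (g i) else if u = -i then g u + min k (g i) else g u) (k - min k (g i))).2.1,
       (pvModel rest (fun u => if u = i then g u - min k (g i) else if u = -i then g u + min k (g i) else g u) (k - min k (g i))).2.2) := rfl

lemma pvALoop1_model (L : List Int) (d : PySem.Dict Int Int) (ans k : Int) (g : Int → Int)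
    (hd : ∀ v, d.getD v 0 = g v) (hk : 0 ≤ k) (hg : ∀ v, 0 ≤ g v) (hL : ∀ i ∈ L, i < 0) :
    (pvALoop1 L (d, ans, k)).2.1 = ans - 2 * (pvModel L g k).1 ∧
    (pvALoop1 L (d, ans, k)).2.2 = (pvModel L g k).2.1 ∧
    ∀ v, (pvALoop1 L (d, ans, k)).1.getD v 0 = (pvModel L g k).2.2 v := by
  induction L generalizing d ans k g with
  | nil => exact ⟨by simp [pvALoop1, pvModel], by simp [pvALoop1, pvModel], fun v => by simp [pvALoop1, pvModel, hd v]⟩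
  | cons i rest ih =>
    have hineg : i < 0 := hL i (by simp)
    have hinei : -i ≠ i := by omega
    set ops := min k (g i) with hops
    have h0ops : 0 ≤ ops := by have := hg i; omega
    have hopsk : ops ≤ k := min_le_left _ _
    set g1 : Int → Int := fun u => if u = i then g u - ops else if u = -i then g u + ops else g u with hg1
    have hg1nn : ∀ v, 0 ≤ g1 v := by
      intro v; simp only [hg1]; split_ifs with h1 h2
      · have := hg i; subst h1; omega
      · have := hg v; omega
      · exact hg v
    rw [pvALoop1_cons, pvModel_cons, hd i, ← hops, ← hg1]
    by_cases hz : g i = 0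
    · -- skipped branch: freq[i] == 0
      have hops0 : ops = 0 := by rw [hops, hz]; omega
      have hg1v : ∀ v, g1 v = g v := by
        intro v; simp only [hg1]; split_ifs <;> simp [hops0]
      have hkk : k - ops = k := by omega
      rw [if_neg (show ¬ g i ≠ 0 by simpa using hz), hkk]
      obtain ⟨h1, h2, h3⟩ := ih d ans k g1 (fun v => (hd v).trans (hg1v v).symm) hk hg1nn
        (fun j hj => hL j (by simp [hj]))
      refine ⟨by rw [h1, hops0]; ring, by rw [h2], fun v => by rw [h3 v]⟩
    · rw [if_pos (show g i ≠ 0 from hz)]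
      have hf2 : ∀ v, ((d.insert i (g i - ops)).insert (-i)
          ((d.insert i (g i - ops)).getD (-i) 0 + ops)).getD v 0 = g1 v := by
        intro v
        rw [PySem.Dict.getD_insert]
        split_ifs with h1
        · rw [PySem.Dict.getD_insert, if_neg hinei, hd (-i)]
          simp only [hg1]
          rw [if_neg (show v ≠ i by omega), if_pos h1, h1]
        · rw [PySem.Dict.getD_insert]
          split_ifs with h2
          · simp only [hg1]
            rw [if_pos h2, h2]
          · rw [hd v]
            simp only [hg1]
            rw [if_neg h2, if_neg h1]
      by_cases hk0 : k - ops = 0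
      · rw [if_pos hk0, hk0]
        obtain ⟨m1, m2, m3⟩ := pvModel_zero rest g1 hg1nn
        refine ⟨by rw [m1]; ring, by rw [m2], fun v => by rw [hf2 v, m3 v]⟩
      · rw [if_neg hk0]
        obtain ⟨h1, h2, h3⟩ := ih _ (ans + (-i) * ops * 2) (k - ops) g1 hf2 (by omega) hg1nn
          (fun j hj => hL j (by simp [hj]))
        refine ⟨by rw [h1]; ring, by rw [h2], fun v => by rw [h3 v]⟩

-- ===== VERDICT (by name: the statement is the Claim_ definition above) =====
theorem largestSumAfterKNegations3_spec : Claim_equal_largestSumAfterKNegations3 := by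
  intro nums k _hdom hpre
  obtain ⟨hk, hb, hsmall⟩ := hpre
  unfold Spec_largestSumAfterKNegations3
  set c : Int → Int := fun v => ((nums.count v : Nat) : Int) with hc
  have hcnn : ∀ v, 0 ≤ c v := fun v => Int.natCast_nonneg _
  set R := PySem.List.pyRange (-100) 0 1 with hR
  have hRmem : ∀ v : Int, v ∈ R ↔ -100 ≤ v ∧ v < 0 := fun v => PySem.List.mem_pyRange_one
  have hRp : R.Pairwise (· < ·) := pvRange_neg_pairwise
  have hRnd : R.Nodup := hRp.imp (fun h => ne_of_lt h)
  have hRneg : ∀ i ∈ R, i < 0 := fun i hi => ((hRmem i).1 hi).2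
  have hd : ∀ v, (PySem.Dict.counter nums).getD v 0 = c v := fun v => PySem.Dict.getD_counter nums v
  obtain ⟨hA1, hA2, hA3⟩ := pvALoop1_model R (PySem.Dict.counter nums) nums.sum k c hd hk hcnn hRneg
  set NL := pvBlocks R c with hNL
  obtain ⟨hT1, hT2⟩ := pvModel_take R c k hk hcnn hRneg hRnd
  -- the sorted negatives of nums are exactly the blocks NL
  have hperm : NL.Perm (nums.filter (fun x => decide (x < 0))) := by
    rw [List.perm_iff_count]
    intro v
    rw [hNL, count_pvBlocks R c v hRnd]
    by_cases hv : v < 0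
    · rw [List.count_filter (by simp [hv])]
      by_cases hvR : v ∈ R
      · rw [if_pos hvR]; simp [hc]
      · rw [if_neg hvR]
        have hnm : v ∉ nums := by
          intro hm; exact hvR ((hRmem v).2 ⟨hb v hm, hv⟩)
        simp [List.count_eq_zero.mpr hnm]
    · have hvR : v ∉ R := fun h => hv ((hRmem v).1 h).2
      rw [if_neg hvR]
      symm; rw [List.count_eq_zero]
      intro hmem
      rcases List.mem_filter.mp hmem with ⟨_, hvf⟩
      simp at hvf; omega
  have hnegs : PySem.List.sorted (nums.filter (fun x => decide (x < 0))) (fun x => x) false = NL :=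
    PySem.List.sorted_id_eq_of_perm_of_pairwise _ NL hperm (pvBlocks_pairwise R c hRp)
  simp only [largestSumAfterKNegations3, largestSumAfterKNegations3_alt, ← hR, hnegs]
  have hflip0 : (0:Int) ≤ min k (NL.length : Int) := le_min hk (Int.natCast_nonneg _)
  have hslice : PySem.List.slice NL none (some (min k (NL.length : Int))) = NL.take k.toNat := by
    rw [PySem.List.slice_to NL hflip0]
    rw [List.take_eq_take_iff]
    omega
  rw [hslice, hA1, hA2, hT1, hT2]
  set kk := k - min k (NL.length : Int) with hkk
  have hkknn : 0 ≤ kk := by rw [hkk]; omega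
  set ansA := nums.sum - 2 * (NL.take k.toNat).sum with hansA
  by_cases hkkpos : kk > 0
  · -- all negatives were flipped
    have hbig : ((NL.length : Int)) ≤ k := by omega
    have hg0 := pvModel_g R c k hcnn hRneg hRnd (by rw [← hNL]; exact hbig)
    have h00 : (pvModel R c k).2.2 0 = c 0 := by
      rw [hg0 0 le_rfl, if_neg (by rw [neg_zero]; intro h; exact absurd ((hRmem 0).1 h).2 (by omega))]
    by_cases hodd : PySem.Int.mod kk 2 = 1
    · set m := PySem.List.minD (nums.map (fun x => |x|)) (fun x => x) 0 with hm
      by_cases h0 : nums.count 0 = 0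
      · -- no zero present: A scans for the smallest positive count, B subtracts the least |x|
        rw [if_pos ⟨hkkpos, hodd, by rw [hA3 0, h00]; simpa [hc] using h0⟩, if_pos ⟨hkkpos, hodd⟩]
        have hR2mem : ∀ v : Int, v ∈ PySem.List.pyRange 1 101 1 ↔ 1 ≤ v ∧ v < 101 :=
          fun v => PySem.List.mem_pyRange_one
        have hfv : ∀ i : Int, 1 ≤ i → i ≤ 100 →
            (pvALoop1 R (PySem.Dict.counter nums, nums.sum, k)).1.getD i 0 = c i + c (-i) := by
          intro i h1 h2
          rw [hA3 i, hg0 i (by omega), if_pos ((hRmem (-i)).2 ⟨by omega, by omega⟩)]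
        by_cases hnil : nums = []
        · subst hnil
          rw [pvALoop2_zero _ _ _ (fun i hi => by
            rcases (hR2mem i).1 hi with ⟨h1, h2⟩
            rw [hfv i h1 (by omega)]; simp [hc])]
          simp [hm, PySem.List.minD_nil]
        · have hmapne : nums.map (fun x => |x|) ≠ [] := by simp [hnil]
          obtain ⟨x0, hx0mem, hx0⟩ := List.mem_map.mp
            (PySem.List.minD_mem (nums.map (fun x => |x|)) (fun x => x) 0 hmapne)
          rw [← hm] at hx0
          have hmle : ∀ y ∈ nums.map (fun x => |x|), m ≤ y :=
            fun y hy => PySem.List.minD_id_le (nums.map (fun x => |x|)) 0 y hy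
          have h0nm : (0:Int) ∉ nums := List.count_eq_zero.mp h0
          have hmpos : 1 ≤ m := by
            have hx0ne : x0 ≠ 0 := fun h => h0nm (h ▸ hx0mem)
            have := abs_pos.mpr hx0ne
            omega
          have hm100 : m ≤ 100 := by
            obtain ⟨x1, hx1mem, hx1⟩ := hsmall.resolve_left hnil
            have hle := hmle |x1| (List.mem_map.mpr ⟨x1, hx1mem, rfl⟩)
            have hlb := hb x1 hx1mem
            rcases abs_choice x1 with h | h <;> omega
          have hmnz : (pvALoop1 R (PySem.Dict.counter nums, nums.sum, k)).1.getD m 0 ≠ 0 := by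
            rw [hfv m hmpos hm100]
            have : x0 = m ∨ x0 = -m := by
              rcases abs_choice x0 with h | h <;> omega
            rcases this with h | h
            · have : 0 < nums.count m := List.count_pos_iff.mpr (h ▸ hx0mem)
              have := hcnn (-m); simp only [hc] at *; omega
            · have : 0 < nums.count (-m) := List.count_pos_iff.mpr (h ▸ hx0mem)
              have := hcnn m; simp only [hc] at *; omega
          rw [pvALoop2_first _ _ _ m ((hR2mem m).2 ⟨hmpos, by omega⟩) hmnz ?_ pvRange_pos_pairwise]
          · ring
          · intro i hi hnz
            rcases (hR2mem i).1 hi with ⟨h1, h2⟩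
            rw [hfv i h1 (by omega)] at hnz
            have : c i ≠ 0 ∨ c (-i) ≠ 0 := by
              have := hcnn i; have := hcnn (-i); omega
            rcases this with h | h
            · have hmem : i ∈ nums := List.count_pos_iff.mp (by simp only [hc] at h; omega)
              have hle := hmle |i| (List.mem_map.mpr ⟨i, hmem, rfl⟩)
              rw [abs_of_nonneg (by omega : (0:Int) ≤ i)] at hle
              omega
            · have hmem : -i ∈ nums := List.count_pos_iff.mp (by simp only [hc] at h; omega)
              have hle := hmle |(-i)| (List.mem_map.mpr ⟨-i, hmem, rfl⟩)
              rw [abs_neg, abs_of_nonneg (by omega : (0:Int) ≤ i)] at hle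
              omega
      · -- a zero is present: A skips the fix-up, B subtracts 2 * 0
        rw [if_neg (by rintro ⟨-, -, hz⟩; rw [hA3 0, h00] at hz; simp [hc] at hz; exact h0 hz),
          if_pos ⟨hkkpos, hodd⟩]
        have h0mem : (0:Int) ∈ nums.map (fun x => |x|) := by
          refine List.mem_map.mpr ⟨0, List.count_pos_iff.mp ?_, abs_zero⟩
          omega
        have hmle : m ≤ 0 := PySem.List.minD_id_le (nums.map (fun x => |x|)) 0 0 h0mem
        have hmmem : m ∈ nums.map (fun x => |x|) :=
          PySem.List.minD_mem (nums.map (fun x => |x|)) (fun x => x) 0 (by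
            intro h; rw [h] at h0mem; simp at h0mem)
        obtain ⟨x0, -, hx0⟩ := List.mem_map.mp hmmem
        have hm0 : m = 0 := by
          have := abs_nonneg x0
          omega
        rw [hm0]; ring
    · rw [if_neg (by rintro ⟨-, h, -⟩; exact hodd h), if_neg (by rintro ⟨-, h⟩; exact hodd h)]
  · rw [if_neg (by rintro ⟨h, -⟩; exact hkkpos h), if_neg (by rintro ⟨h, -⟩; exact hkkpos h)]
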